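-- pv_equiv track=rewrite | github.com/flaviacaetanoliveira-ui/FDL_Consultoria | etapa4b_integracao_contas_receber.py | _detectar_col_data_emissao
-- ===== SOURCE A (Python) =====
-- def _detectar_col_data_emissao(columns: list[str]) -> str:
--     norm = {c: str(c).strip().lower() for c in columns}
--     for col, nome in norm.items():
--         if "data" in nome and "emiss" in nome:
--             return col
--     for col, nome in norm.items():
--         if "emiss" in nome:
--             return col
--     return ""
-- ===== SOURCE B (Python) =====
-- def _detectar_col_data_emissao(columns: list[str]) -> str:
--     # single pass: return first column whose name has both 'data' and 'emiss';
--     # remember the first 'emiss'-only column as fallback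
--     fallback = None
--     for col in columns:
--         nome = str(col).strip().lower()
--         if "data" in nome and "emiss" in nome:
--             return col
--         if fallback is None and "emiss" in nome:
--             fallback = col
--     return fallback if fallback is not None else ""
-- ===== Notes on version B (the rewrite author's own statement) =====
-- stated objective: simpler
-- what changed: Replaced the intermediate dict plus two separate scans with one pass over the list that returns a data+emiss match immediately and keeps the first emiss-only column as a fallback accumulator.
import Mathlib
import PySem

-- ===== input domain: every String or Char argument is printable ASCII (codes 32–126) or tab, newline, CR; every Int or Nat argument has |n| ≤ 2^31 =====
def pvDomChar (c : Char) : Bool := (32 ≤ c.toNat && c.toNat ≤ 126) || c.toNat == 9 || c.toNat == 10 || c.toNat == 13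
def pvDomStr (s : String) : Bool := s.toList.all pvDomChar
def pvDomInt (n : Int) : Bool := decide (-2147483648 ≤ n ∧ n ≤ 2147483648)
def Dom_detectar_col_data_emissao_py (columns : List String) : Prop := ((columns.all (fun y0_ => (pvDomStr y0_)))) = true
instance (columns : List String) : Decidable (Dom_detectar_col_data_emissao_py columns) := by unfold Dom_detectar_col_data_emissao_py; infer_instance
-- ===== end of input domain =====

-- B replaces A's intermediate dict and two separate scans with one pass keeping the first emiss-only column as a fallback (simpler decomposition, same result).
-- ===== PORT A =====
-- dict comprehension {c: str(c).strip().lower() for c in columns}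
def pvNormA (columns : List String) : PySem.Dict String String :=
  columns.foldl (fun d c => d.insert c (PySem.Str.lower (PySem.Str.strip c))) PySem.Dict.empty

def detectar_col_data_emissao_py (columns : List String) : String :=
  match (pvNormA columns).items.find? (fun p => PySem.Str.isIn "data" p.2 && PySem.Str.isIn "emiss" p.2) with
  | some p => p.1
  | none =>
    match (pvNormA columns).items.find? (fun p => PySem.Str.isIn "emiss" p.2) with
    | some p => p.1
    | none => ""

-- ===== PORT B =====
-- one pass, first emiss-only column kept as fallback (None sentinel)
def pvScanB : List String → Option String → String
  | [], fb => fb.getD ""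
  | c :: rest, fb =>
    let nome := PySem.Str.lower (PySem.Str.strip c)
    if PySem.Str.isIn "data" nome && PySem.Str.isIn "emiss" nome then c
    else pvScanB rest (if fb.isNone && PySem.Str.isIn "emiss" nome then some c else fb)

def detectar_col_data_emissao_py_alt (columns : List String) : String :=
  pvScanB columns none

-- ===== PRECONDITION & SPEC =====
def Spec_detectar_col_data_emissao_py (columns : List String) (out : String) : Prop := out = detectar_col_data_emissao_py_alt columns
instance (columns : List String) (out : String) : Decidable (Spec_detectar_col_data_emissao_py columns out) := by unfold Spec_detectar_col_data_emissao_py; infer_instance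

-- ===== CLAIM (what is proved, stated in full; the proofs are below) =====
def Claim_equal_detectar_col_data_emissao_py : Prop := ∀ (columns : List String), Dom_detectar_col_data_emissao_py columns → Spec_detectar_col_data_emissao_py columns (detectar_col_data_emissao_py columns)

-- ===== LEMMAS AND PROOFS =====

def pvF (c : String) : String := PySem.Str.lower (PySem.Str.strip c)

def pvIns (d : PySem.Dict String String) (c : String) : PySem.Dict String String :=
  d.insert c (pvF c)

-- invariant: every stored value is pvF of its key
def pvH (d : PySem.Dict String String) : Prop := ∀ p ∈ d.items, p.2 = pvF p.1

theorem pvItems_ins_stable (d : PySem.Dict String String) (c : String) (hd : pvH d) :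
    (pvIns d c).items = if d.contains c then d.items else d.items ++ [(c, pvF c)] := by
  unfold pvIns
  rw [PySem.Dict.items_insert]
  split_ifs with h
  · rw [show (d.items.map (fun p => if p.1 == c then (c, pvF c) else p)) = d.items.map id from
      List.map_congr_left ?_, List.map_id]
    intro p hp
    by_cases hc : p.1 = c
    · simp only [hc, beq_self_eq_true, if_pos, id]
      have := hd p hp
      rw [← hc, ← this]
    · simp [hc]
  · rfl

theorem pvH_ins (d : PySem.Dict String String) (c : String) (hd : pvH d) : pvH (pvIns d c) := by
  intro p hp
  rw [pvItems_ins_stable d c hd] at hp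
  split_ifs at hp with h
  · exact hd p hp
  · rcases List.mem_append.mp hp with h1 | h1
    · exact hd p h1
    · simp only [List.mem_singleton] at h1
      subst h1; rfl

theorem pvContains_ins (d : PySem.Dict String String) (c k : String) :
    (pvIns d c).contains k = (k == c || d.contains k) := by
  simp [pvIns, PySem.Dict.contains_insert]

-- main invariant lemma for the fold building A's dict
theorem pvFindFold (q : String × String → Bool) :
    ∀ (xs : List String) (d : PySem.Dict String String), pvH d →
    ((xs.foldl pvIns d).items.find? q) =
      (d.items.find? q).or ((xs.find? (fun c => q (c, pvF c) && !d.contains c)).map (fun c => (c, pvF c))) := by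
  intro xs
  induction xs with
  | nil => intro d _; simp
  | cons c xs ih =>
    intro d hd
    have hstep : (c :: xs).foldl pvIns d = xs.foldl pvIns (pvIns d c) := rfl
    rw [hstep, ih _ (pvH_ins d c hd), pvItems_ins_stable d c hd]
    by_cases h : d.contains c = true
    · rw [if_pos h]
      have hpred : (fun c' => q (c', pvF c') && !(pvIns d c).contains c')
          = (fun c' => q (c', pvF c') && !d.contains c') := by
        funext c'
        rw [pvContains_ins]
        by_cases hc : c' = c
        · subst hc; rw [h]; simp
        · have hb : (c' == c) = false := beq_eq_false_iff_ne.mpr hc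
          simp [hb]
      rw [hpred]
      have : (c :: xs).find? (fun c' => q (c', pvF c') && !d.contains c')
          = xs.find? (fun c' => q (c', pvF c') && !d.contains c') := by
        rw [List.find?_cons]
        simp [h]
      rw [this]
    · rw [if_neg h]
      simp only [Bool.not_eq_true] at h
      rw [List.find?_append]
      by_cases hq : q (c, pvF c) = true
      · have h1 : List.find? q [(c, pvF c)] = some (c, pvF c) := by simp [List.find?, hq]
        have h2 : (c :: xs).find? (fun c' => q (c', pvF c') && !d.contains c') = some c := by
          rw [List.find?_cons]; simp [hq, h]
        rw [h1, h2, Option.or_assoc]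
        have h3 : ∀ (y : Option (String × String)), (some (c, pvF c)).or y = some (c, pvF c) := by
          intro y; rfl
        rw [h3]
        rfl
      · simp only [Bool.not_eq_true] at hq
        have h1 : List.find? q [(c, pvF c)] = none := by simp [List.find?, hq]
        have h2 : (c :: xs).find? (fun c' => q (c', pvF c') && !d.contains c')
            = xs.find? (fun c' => q (c', pvF c') && !d.contains c') := by
          rw [List.find?_cons]; simp [hq]
        have hpred : (fun c' => q (c', pvF c') && !(pvIns d c).contains c')
            = (fun c' => q (c', pvF c') && !d.contains c') := by
          funext c'
          rw [pvContains_ins]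
          by_cases hc : c' = c
          · subst hc; simp [h, hq]
          · have hb : (c' == c) = false := beq_eq_false_iff_ne.mpr hc
            simp [hb]
        rw [h1, h2, hpred, Option.or_none]

-- characterization of B's single pass
theorem pvScanB_char : ∀ (xs : List String) (fb : Option String),
    pvScanB xs fb =
      match xs.find? (fun c => PySem.Str.isIn "data" (PySem.Str.lower (PySem.Str.strip c)) && PySem.Str.isIn "emiss" (PySem.Str.lower (PySem.Str.strip c))) with
      | some c => c
      | none => (fb.or (xs.find? (fun c => PySem.Str.isIn "emiss" (PySem.Str.lower (PySem.Str.strip c))))).getD "" := by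
  intro xs
  induction xs with
  | nil =>
    intro fb
    cases fb <;> rfl
  | cons c xs ih =>
    intro fb
    rw [pvScanB, List.find?_cons, List.find?_cons]
    by_cases h1 : (PySem.Str.isIn "data" (PySem.Str.lower (PySem.Str.strip c)) && PySem.Str.isIn "emiss" (PySem.Str.lower (PySem.Str.strip c))) = true
    · rw [if_pos h1, h1]
    · rw [if_neg h1, Bool.not_eq_true] at *
      rw [h1, ih]
      cases hf : xs.find? (fun c => PySem.Str.isIn "data" (PySem.Str.lower (PySem.Str.strip c)) && PySem.Str.isIn "emiss" (PySem.Str.lower (PySem.Str.strip c))) with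
      | some a => rfl
      | none =>
        by_cases h2 : PySem.Str.isIn "emiss" (PySem.Str.lower (PySem.Str.strip c)) = true
        · rw [h2]
          cases fb with
          | none => rfl
          | some a => rfl
        · rw [Bool.not_eq_true] at h2
          simp only [h2, Bool.and_false, if_neg (Bool.false_ne_true)]

theorem pvH_empty : pvH PySem.Dict.empty := by
  intro p hp
  simp [PySem.Dict.empty] at hp

-- ===== VERDICT (by name: the statement is the Claim_ definition above) =====
theorem detectar_col_data_emissao_py_spec : Claim_equal_detectar_col_data_emissao_py := by
  intro columns _
  show detectar_col_data_emissao_py columns = detectar_col_data_emissao_py_alt columns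
  unfold detectar_col_data_emissao_py detectar_col_data_emissao_py_alt
  have hnorm : pvNormA columns = columns.foldl pvIns PySem.Dict.empty := rfl
  rw [pvScanB_char]
  simp only [hnorm]
  have key := fun q => pvFindFold q columns PySem.Dict.empty pvH_empty
  have hemp : (PySem.Dict.empty : PySem.Dict String String).items = [] := rfl
  have hcon : ∀ c, (PySem.Dict.empty : PySem.Dict String String).contains c = false := by
    intro c; exact PySem.Dict.contains_empty c
  have k1 := key (fun p => PySem.Str.isIn "data" p.2 && PySem.Str.isIn "emiss" p.2)
  have k2 := key (fun p => PySem.Str.isIn "emiss" p.2)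
  simp only [hemp, List.find?_nil, Option.none_or] at k1 k2
  have hp1 : (fun c => (PySem.Str.isIn "data" (pvF c) && PySem.Str.isIn "emiss" (pvF c)) && !(PySem.Dict.empty : PySem.Dict String String).contains c)
      = (fun c => PySem.Str.isIn "data" (pvF c) && PySem.Str.isIn "emiss" (pvF c)) := by
    funext c; rw [hcon c]; simp
  have hp2 : (fun c => PySem.Str.isIn "emiss" (pvF c) && !(PySem.Dict.empty : PySem.Dict String String).contains c)
      = (fun c => PySem.Str.isIn "emiss" (pvF c)) := by
    funext c; rw [hcon c]; simp
  rw [hp1] at k1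
  rw [hp2] at k2
  simp only [pvF] at k1 k2
  rw [k1, k2]
  cases columns.find? (fun c => PySem.Str.isIn "data" (PySem.Str.lower (PySem.Str.strip c)) && PySem.Str.isIn "emiss" (PySem.Str.lower (PySem.Str.strip c))) with
  | some c => rfl
  | none =>
    cases columns.find? (fun c => PySem.Str.isIn "emiss" (PySem.Str.lower (PySem.Str.strip c))) with
    | some c => rfl
    | none => rfl
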